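-- pv_equiv track=rewrite | github.com/DipperChen2007/Skibidi_Enhancer | S/17/17_s1.py | Sum_Game
-- ===== SOURCE A (Python) =====
-- def Sum_Game(n,team_1,team_2):
--     dp = [0]*(n + 1)
--     sum_1 = 0
--     sum_2 = 0
--     dp[0] = 1
--     for i in range(n):
--         sum_1 += team_1[i]
--         sum_2 += team_2[i]
--         if sum_1 == sum_2:
--             dp[i+1] += 1
--     answer = 0
--     for j in range(n + 1):
--         if dp[j] == 1:
--             answer = max(answer,j)
--     return answer
-- ===== SOURCE B (Python) =====
-- def Sum_Game(n, team_1, team_2):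
--     sum_1 = 0
--     sum_2 = 0
--     best = 0
--     for i in range(n):
--         sum_1 += team_1[i]
--         sum_2 += team_2[i]
--         if sum_1 == sum_2:
--             best = i + 1
--     return best
-- ===== Notes on version B (the rewrite author's own statement) =====
-- stated objective: simpler
-- what changed: Drops the dp table and the second max-scan: one pass keeps running sums and overwrites a best index whenever they are equal, returning it directly.
import Mathlib
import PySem

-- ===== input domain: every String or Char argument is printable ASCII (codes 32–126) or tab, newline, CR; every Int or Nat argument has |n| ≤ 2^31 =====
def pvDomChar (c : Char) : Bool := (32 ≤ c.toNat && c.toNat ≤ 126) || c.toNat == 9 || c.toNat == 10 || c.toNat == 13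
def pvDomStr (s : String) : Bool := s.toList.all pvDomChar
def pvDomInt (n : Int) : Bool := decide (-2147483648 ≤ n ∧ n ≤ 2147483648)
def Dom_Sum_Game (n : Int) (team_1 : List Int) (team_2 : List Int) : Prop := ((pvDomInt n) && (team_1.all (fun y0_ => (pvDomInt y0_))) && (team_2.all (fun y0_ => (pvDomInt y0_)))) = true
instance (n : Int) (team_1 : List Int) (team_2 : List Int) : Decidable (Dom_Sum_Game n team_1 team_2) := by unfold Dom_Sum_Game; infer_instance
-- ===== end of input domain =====

-- B drops A's dp table and second max-scan: one pass keeps running sums and a best index (simpler, O(1) extra space).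

-- ===== PORT A =====
-- dp = [0]*(n+1); dp[0]=1; loop filling dp; then scan for the largest j with dp[j]==1
def Sum_Game (n : Int) (team_1 : List Int) (team_2 : List Int) : Int :=
  let dp : List Int := (List.replicate (n + 1).toNat 0).set 0 1
  let st := (PySem.List.pyRange 0 n 1).foldl
    (fun (st : List Int × Int × Int) i =>
      let s1 := st.2.1 + PySem.List.pyGetD team_1 i 0
      let s2 := st.2.2 + PySem.List.pyGetD team_2 i 0
      let dp := if s1 = s2 then st.1.set (i + 1).toNat (PySem.List.pyGetD st.1 (i + 1) 0 + 1) else st.1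
      (dp, s1, s2)) (dp, 0, 0)
  (PySem.List.pyRange 0 (n + 1) 1).foldl
    (fun ans j => if PySem.List.pyGetD st.1 j 0 = 1 then max ans j else ans) 0

-- ===== PORT B =====
-- one pass: running sums and best index, overwritten whenever the sums agree
def Sum_Game_alt (n : Int) (team_1 : List Int) (team_2 : List Int) : Int :=
  ((PySem.List.pyRange 0 n 1).foldl
    (fun (st : Int × Int × Int) i =>
      let s1 := st.1 + PySem.List.pyGetD team_1 i 0
      let s2 := st.2.1 + PySem.List.pyGetD team_2 i 0
      (s1, s2, if s1 = s2 then i + 1 else st.2.2)) (0, 0, 0)).2.2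

-- ===== PRECONDITION & SPEC =====
-- Pre_ excludes exactly the inputs where A raises IndexError: n < 0 (dp[0] on an empty/negative-size list)
-- or n larger than a team list (team_k[i] out of range).
def Pre_Sum_Game (n : Int) (team_1 : List Int) (team_2 : List Int) : Prop :=
  0 ≤ n ∧ n ≤ (team_1.length : Int) ∧ n ≤ (team_2.length : Int)
instance (n : Int) (team_1 : List Int) (team_2 : List Int) : Decidable (Pre_Sum_Game n team_1 team_2) := by unfold Pre_Sum_Game; infer_instance
def pvWitness_Sum_Game : Int × List Int × List Int := (2, [1, 2], [3, 0])

def Spec_Sum_Game (n : Int) (team_1 : List Int) (team_2 : List Int) (out : Int) : Prop := out = Sum_Game_alt n team_1 team_2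
instance (n : Int) (team_1 : List Int) (team_2 : List Int) (out : Int) : Decidable (Spec_Sum_Game n team_1 team_2 out) := by unfold Spec_Sum_Game; infer_instance

-- ===== CLAIM (what is proved, stated in full; the proofs are below) =====
def Claim_equal_Sum_Game : Prop := ∀ (n : Int) (team_1 : List Int) (team_2 : List Int), Dom_Sum_Game n team_1 team_2 → Pre_Sum_Game n team_1 team_2 → Spec_Sum_Game n team_1 team_2 (Sum_Game n team_1 team_2)

-- ===== LEMMAS AND PROOFS =====

-- the common reference value: best prefix index after m steps
def bestAux (t1 t2 : List Int) : Nat → Int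
  | 0 => 0
  | m + 1 => if (t1.take (m + 1)).sum = (t2.take (m + 1)).sum then ((m : Int) + 1) else bestAux t1 t2 m

lemma bestAux_le (t1 t2 : List Int) (m : Nat) : bestAux t1 t2 m ≤ (m : Int) := by
  induction m with
  | zero => simp [bestAux]
  | succ k ih =>
    simp only [bestAux]
    split
    · push_cast; omega
    · have := ih; push_cast at this ⊢; omega

lemma sum_take_succ (t : List Int) (m : Nat) (h : m < t.length) :
    (t.take (m + 1)).sum = (t.take m).sum + t[m] :=
  List.sum_take_succ t m h

lemma pyGetD_nat (t : List Int) (m : Nat) (h : m < t.length) :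
    PySem.List.pyGetD t (m : Int) 0 = t[m] := by
  rw [PySem.List.pyGetD_eq_getElem] <;> simp [h]

-- B's loop invariant
lemma alt_loop (t1 t2 : List Int) (m : Nat) (h1 : m ≤ t1.length) (h2 : m ≤ t2.length) :
    (PySem.List.pyRange 0 (m : Int) 1).foldl
      (fun (st : Int × Int × Int) i =>
        let s1 := st.1 + PySem.List.pyGetD t1 i 0
        let s2 := st.2.1 + PySem.List.pyGetD t2 i 0
        (s1, s2, if s1 = s2 then i + 1 else st.2.2)) (0, 0, 0)
    = ((t1.take m).sum, (t2.take m).sum, bestAux t1 t2 m) := by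
  induction m with
  | zero => simp [PySem.List.pyRange_one_eq_nil, bestAux]
  | succ k ih =>
    have hk1 : k < t1.length := by omega
    have hk2 : k < t2.length := by omega
    have hr : PySem.List.pyRange 0 ((k : Int) + 1) 1 = PySem.List.pyRange 0 (k : Int) 1 ++ [(k : Int)] :=
      PySem.List.pyRange_one_succ_right (by positivity)
    push_cast
    rw [hr, List.foldl_append, ih (by omega) (by omega)]
    simp only [List.foldl_cons, List.foldl_nil, pyGetD_nat t1 k hk1, pyGetD_nat t2 k hk2]
    rw [← sum_take_succ t1 k hk1, ← sum_take_succ t2 k hk2]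
    simp [bestAux]

-- dp model after m loop steps, with table size M+1
def dpModel (t1 t2 : List Int) (M m : Nat) : List Int :=
  (List.range (M + 1)).map (fun j => if j = 0 ∨ (j ≤ m ∧ (t1.take j).sum = (t2.take j).sum) then 1 else 0)

lemma dpModel_length (t1 t2 : List Int) (M m : Nat) : (dpModel t1 t2 M m).length = M + 1 := by
  simp [dpModel]

lemma dpModel_get (t1 t2 : List Int) (M m j : Nat) (hj : j < M + 1) :
    (dpModel t1 t2 M m)[j]'(by simp [dpModel_length, hj]) =
      if j = 0 ∨ (j ≤ m ∧ (t1.take j).sum = (t2.take j).sum) then 1 else 0 := by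
  simp [dpModel]

lemma dpModel_zero (t1 t2 : List Int) (M : Nat) :
    (List.replicate (M + 1) (0 : Int)).set 0 1 = dpModel t1 t2 M 0 := by
  apply List.ext_getElem
  · simp [dpModel_length]
  · intro j h1 h2
    have hj : j < M + 1 := by simpa using h1
    rw [dpModel_get t1 t2 M 0 j hj]
    rcases Nat.eq_zero_or_pos j with h | h
    · subst h; simp
    · rw [List.getElem_set_ne (by omega)]
      simp [List.getElem_replicate]
      omega

-- A's dp loop invariant
lemma a_loop (t1 t2 : List Int) (M m : Nat) (hm : m ≤ M) (h1 : M ≤ t1.length) (h2 : M ≤ t2.length) :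
    (PySem.List.pyRange 0 (m : Int) 1).foldl
      (fun (st : List Int × Int × Int) i =>
        let s1 := st.2.1 + PySem.List.pyGetD t1 i 0
        let s2 := st.2.2 + PySem.List.pyGetD t2 i 0
        let dp := if s1 = s2 then st.1.set (i + 1).toNat (PySem.List.pyGetD st.1 (i + 1) 0 + 1) else st.1
        (dp, s1, s2)) ((List.replicate (M + 1) 0).set 0 1, 0, 0)
    = (dpModel t1 t2 M m, (t1.take m).sum, (t2.take m).sum) := by
  induction m with
  | zero =>
    simp only [Nat.cast_zero, PySem.List.pyRange_one_eq_nil le_rfl, List.foldl_nil,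
      List.take_zero, List.sum_nil]
    rw [dpModel_zero]
  | succ k ih =>
    have hk1 : k < t1.length := by omega
    have hk2 : k < t2.length := by omega
    have hr : PySem.List.pyRange 0 ((k : Int) + 1) 1 = PySem.List.pyRange 0 (k : Int) 1 ++ [(k : Int)] :=
      PySem.List.pyRange_one_succ_right (by positivity)
    push_cast
    rw [hr, List.foldl_append, ih (by omega)]
    simp only [List.foldl_cons, List.foldl_nil, pyGetD_nat t1 k hk1, pyGetD_nat t2 k hk2]
    rw [← sum_take_succ t1 k hk1, ← sum_take_succ t2 k hk2]
    have htonat : ((k : Int) + 1).toNat = k + 1 := by omega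
    by_cases heq : (t1.take (k + 1)).sum = (t2.take (k + 1)).sum
    · rw [if_pos heq, htonat]
      have hget : PySem.List.pyGetD (dpModel t1 t2 M k) ((k : Int) + 1) 0 = 0 := by
        have hc : ((k : Int) + 1) = ((k + 1 : Nat) : Int) := by push_cast; ring
        rw [hc, pyGetD_nat _ _ (by simp [dpModel_length]; omega),
            dpModel_get t1 t2 M k (k + 1) (by omega), if_neg (by rintro (h | ⟨h, _⟩) <;> omega)]
      rw [hget]
      congr 1
      apply List.ext_getElem
      · simp [dpModel_length]
      · intro j hL hR
        have hj : j < M + 1 := by simpa [dpModel_length] using hL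
        rw [dpModel_get t1 t2 M (k + 1) j hj]
        by_cases hjk : j = k + 1
        · subst hjk
          rw [List.getElem_set_self (by simp [dpModel_length]; omega)]
          simp [heq]
        · rw [List.getElem_set_ne (by omega), dpModel_get t1 t2 M k j hj]
          by_cases hj0 : j = 0
          · simp [hj0]
          · simp only [hj0, false_or]
            have : (j ≤ k + 1 ∧ (t1.take j).sum = (t2.take j).sum) ↔
                   (j ≤ k ∧ (t1.take j).sum = (t2.take j).sum) := by
              constructor
              · rintro ⟨ha, hb⟩; exact ⟨by omega, hb⟩
              · rintro ⟨ha, hb⟩; exact ⟨by omega, hb⟩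
            simp only [this]
    · rw [if_neg heq]
      congr 1
      apply List.ext_getElem
      · simp [dpModel_length]
      · intro j hL hR
        have hj : j < M + 1 := by simpa [dpModel_length] using hL
        rw [dpModel_get t1 t2 M k j hj, dpModel_get t1 t2 M (k + 1) j hj]
        by_cases hj0 : j = 0
        · simp [hj0]
        · simp only [hj0, false_or]
          by_cases hjk : j = k + 1
          · subst hjk; simp [heq]
          · have : (j ≤ k ∧ (t1.take j).sum = (t2.take j).sum) ↔
                   (j ≤ k + 1 ∧ (t1.take j).sum = (t2.take j).sum) := by
              constructor
              · rintro ⟨ha, hb⟩; exact ⟨by omega, hb⟩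
              · rintro ⟨ha, hb⟩; exact ⟨by omega, hb⟩
            simp only [this]

-- A's answer scan over the final dp computes bestAux
lemma scan_loop (t1 t2 : List Int) (M : Nat) (k : Nat) (hk : k ≤ M) :
    (PySem.List.pyRange 0 ((k : Int) + 1) 1).foldl
      (fun ans j => if PySem.List.pyGetD (dpModel t1 t2 M M) j 0 = 1 then max ans j else ans) 0
    = bestAux t1 t2 k := by
  induction k with
  | zero =>
    rw [PySem.List.pyRange_one_cons (by norm_num), PySem.List.pyRange_one_eq_nil (by norm_num)]
    have : PySem.List.pyGetD (dpModel t1 t2 M M) ((0 : Nat) : Int) 0 = 1 := by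
      rw [pyGetD_nat _ _ (by simp [dpModel_length]), dpModel_get t1 t2 M M 0 (by omega)]
      simp
    simpa [bestAux] using this
  | succ k ih =>
    have hr : PySem.List.pyRange 0 (((k : Int) + 1) + 1) 1
        = PySem.List.pyRange 0 ((k : Int) + 1) 1 ++ [(k : Int) + 1] :=
      PySem.List.pyRange_one_succ_right (by positivity)
    push_cast
    rw [hr, List.foldl_append, ih (by omega)]
    simp only [List.foldl_cons, List.foldl_nil]
    have hcast : ((k : Int) + 1) = ((k + 1 : Nat) : Int) := by push_cast; ring
    have hget : PySem.List.pyGetD (dpModel t1 t2 M M) ((k : Int) + 1) 0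
        = if (t1.take (k + 1)).sum = (t2.take (k + 1)).sum then 1 else 0 := by
      rw [hcast, pyGetD_nat _ _ (by simp [dpModel_length]; omega),
          dpModel_get t1 t2 M M (k + 1) (by omega)]
      have hle : k + 1 ≤ M := by omega
      simp [hle]
    rw [hget]
    by_cases heq : (t1.take (k + 1)).sum = (t2.take (k + 1)).sum
    · have hle := bestAux_le t1 t2 k
      rw [if_pos heq]
      simp only [bestAux, if_pos heq]
      push_cast
      omega
    · simp [heq, bestAux]

-- ===== VERDICT (by name: the statement is the Claim_ definition above) =====
theorem Sum_Game_spec : Claim_equal_Sum_Game := by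
  intro n t1 t2 _ hpre
  obtain ⟨hn, h1, h2⟩ := hpre
  simp only [Spec_Sum_Game, Sum_Game, Sum_Game_alt]
  set M := n.toNat with hM
  have hnM : n = (M : Int) := by omega
  have ht : ((M : Int) + 1).toNat = M + 1 := by omega
  have hM1 : M ≤ t1.length := by omega
  have hM2 : M ≤ t2.length := by omega
  rw [hnM, ht, alt_loop t1 t2 M hM1 hM2, a_loop t1 t2 M M le_rfl hM1 hM2]
  exact scan_loop t1 t2 M M le_rfl
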